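-- pv_equiv track=rewrite | github.com/safeiris/content | length_controller.py | _build_precision_filler
-- ===== SOURCE A (Python) =====
-- from typing import Iterable, List, Optional, Tuple
--
-- _PRECISION_WORDS: Tuple[str, ...] = (
--     "подробности",
--     "пример",
--     "детали",
--     "вывод",
--     "анализ",
--     "решение",
--     "инициатива",
--     "практика",
-- )
--
-- def _build_precision_filler(delta: int) -> str:
--     if delta <= 0:
--         return ""
--     target_core = max(0, delta - 1)
--     collected: List[str] = []
--     total = 0
--     index = 0
--     while total < target_core:
--         word = _PRECISION_WORDS[index % len(_PRECISION_WORDS)] if _PRECISION_WORDS else "слово"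
--         index += 1
--         clean = word.replace(" ", "")
--         remaining = target_core - total
--         if len(clean) > remaining:
--             clean = clean[:remaining]
--         collected.append(clean)
--         total += len(clean)
--     body = " ".join(item for item in collected if item).strip()
--     if body:
--         return f" {body}."
--     return " ."
-- ===== SOURCE B (Python) =====
-- from typing import Tuple
--
-- _PRECISION_WORDS: Tuple[str, ...] = (
--     "подробности",
--     "пример",
--     "детали",
--     "вывод",
--     "анализ",
--     "решение",
--     "инициатива",
--     "практика",
-- )
--
-- _CYCLE_LEN = sum(len(w) for w in _PRECISION_WORDS)
--
-- def _build_precision_filler(delta: int) -> str: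
--     if delta <= 0:
--         return ""
--     target_core = delta - 1
--     if target_core == 0:
--         return " ."
--     q, r = divmod(target_core, _CYCLE_LEN)
--     collected = list(_PRECISION_WORDS) * q
--     for word in _PRECISION_WORDS:
--         if r == 0:
--             break
--         if len(word) > r:
--             collected.append(word[:r])
--             r = 0
--         else:
--             collected.append(word)
--             r -= len(word)
--     return " " + " ".join(collected) + "."
-- ===== Notes on version B (the rewrite author's own statement) =====
-- stated objective: faster
-- what changed: A appends words one at a time in a while loop until the character budget is met; B computes divmod(delta-1, total_cycle_length) to emit whole copies of the word tuple at once and then walks the words a single time to build the truncated remainder, skipping A's per-word filter/strip since no word is empty or contains spaces.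
import Mathlib
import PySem

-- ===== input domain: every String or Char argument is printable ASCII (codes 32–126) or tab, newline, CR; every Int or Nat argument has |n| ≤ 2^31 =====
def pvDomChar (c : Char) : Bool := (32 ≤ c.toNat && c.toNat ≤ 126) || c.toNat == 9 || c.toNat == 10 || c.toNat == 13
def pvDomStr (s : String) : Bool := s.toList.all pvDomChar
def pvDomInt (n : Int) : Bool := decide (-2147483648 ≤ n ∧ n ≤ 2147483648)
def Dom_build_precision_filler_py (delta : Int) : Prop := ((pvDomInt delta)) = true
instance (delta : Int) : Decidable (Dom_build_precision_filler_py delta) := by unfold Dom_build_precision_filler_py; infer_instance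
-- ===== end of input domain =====

-- B replaces A's one-character-at-a-time while loop over a cycling word index by divmod cycle
-- arithmetic (whole copies of the word tuple plus one truncated walk); objective: faster (constant factor per cycle).

-- ===== PORT A =====
def pvWordsA : List String :=
  ["подробности", "пример", "детали", "вывод", "анализ", "решение", "инициатива", "практика"]

-- used by the port's decreasing_by: each word of the tuple, with spaces removed, is nonempty
lemma pvWordA_clean_len (i : Nat) :
    1 ≤ (PySem.Str.replace (PySem.List.pyGetD pvWordsA ((i % pvWordsA.length : Nat) : Int) "") " " "").toList.length := by
  simp only [PySem.List.pyGetD_natCast]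
  have hlt : i % pvWordsA.length < 8 := Nat.mod_lt _ (by decide)
  set j := i % pvWordsA.length with hj
  interval_cases j <;> decide

def pvLoopA (target_core : Int) (collected : List String) (total : Int) (index : Nat) : List String :=
  if h : total < target_core then
    -- word = _PRECISION_WORDS[index % len(...)] if _PRECISION_WORDS else "слово"
    let word : String := if pvWordsA.length ≠ 0 then PySem.List.pyGetD pvWordsA ((index % pvWordsA.length : Nat) : Int) "" else "слово"
    let clean0 : String := PySem.Str.replace word " " ""
    -- remaining = target_core - total ; if len(clean) > remaining: clean = clean[:remaining]
    let clean : String := if PySem.Str.len clean0 > (target_core - total) then PySem.Str.slice clean0 none (some (target_core - total)) else clean0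
    pvLoopA target_core (collected ++ [clean]) (total + PySem.Str.len clean) (index + 1)
  else collected
termination_by (target_core - total).toNat
decreasing_by
  have hw1 := pvWordA_clean_len index
  have hw2 : 1 ≤ (PySem.Str.replace "слово" " " "").toList.length := by decide
  split <;> split <;>
    first
      | (rename_i hgt
         simp only [PySem.Str.len_eq] at hgt ⊢
         rw [PySem.Str.toList_slice, PySem.Chars.slice_eq_listSlice,
           PySem.List.slice_to _ (by omega), List.length_take]
         omega)
      | (simp only [PySem.Str.len_eq]; omega)

def build_precision_filler_py (delta : Int) : String :=
  if delta ≤ 0 then ""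
  else
    let target_core : Int := max 0 (delta - 1)
    let collected : List String := pvLoopA target_core [] 0 0
    let body : String := PySem.Str.strip (PySem.Str.join " " (collected.filter (fun it => it != "")))
    if body ≠ "" then " " ++ body ++ "." else " ."

-- ===== PORT B =====
def pvWordsB : List String :=
  ["подробности", "пример", "детали", "вывод", "анализ", "решение", "инициатива", "практика"]

def pvCycleLenB : Int := (pvWordsB.map PySem.Str.len).sum

-- the for-loop with break: walk the words once, truncating the last one
def pvPartialB : Int → List String → List String
  | _, [] => []
  | r, w :: ws =>
    if r = 0 then []
    else if PySem.Str.len w > r then [PySem.Str.slice w none (some r)]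
    else w :: pvPartialB (r - PySem.Str.len w) ws

def build_precision_filler_py_alt (delta : Int) : String :=
  if delta ≤ 0 then ""
  else
    let target_core : Int := delta - 1
    if target_core = 0 then " ."
    else
      let q : Int := PySem.Int.floordiv target_core pvCycleLenB
      let r : Int := PySem.Int.mod target_core pvCycleLenB
      let collected : List String := (List.replicate q.toNat pvWordsB).flatten ++ pvPartialB r pvWordsB
      " " ++ PySem.Str.join " " collected ++ "."

-- ===== PRECONDITION & SPEC =====
def Spec_build_precision_filler_py (delta : Int) (out : String) : Prop := out = build_precision_filler_py_alt delta
instance (delta : Int) (out : String) : Decidable (Spec_build_precision_filler_py delta out) := by unfold Spec_build_precision_filler_py; infer_instance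

-- ===== CLAIM (what is proved, stated in full; the proofs are below) =====
def Claim_equal_build_precision_filler_py : Prop := ∀ (delta : Int), Dom_build_precision_filler_py delta → Spec_build_precision_filler_py delta (build_precision_filler_py delta)

-- ===== LEMMAS AND PROOFS =====

lemma pvClean_len_pos (c0 : String) (h0 : 1 ≤ c0.toList.length) (remaining : Int) (hr : 1 ≤ remaining) :
    1 ≤ (if PySem.Str.len c0 > remaining then PySem.Str.slice c0 none (some remaining) else c0).toList.length := by
  split_ifs with h
  · rw [PySem.Str.toList_slice, PySem.Chars.slice_eq_listSlice,
      PySem.List.slice_to _ (by omega : (0:Int) ≤ remaining)]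
    rw [List.length_take]
    omega
  · exact h0

-- proof-side restatement of A's loop on the remaining budget (rem = target_core - total)
def pvG (rem : Nat) (idx : Nat) : List String :=
  if h : rem = 0 then []
  else
    let word : String := if pvWordsA.length ≠ 0 then PySem.List.pyGetD pvWordsA ((idx % pvWordsA.length : Nat) : Int) "" else "слово"
    let clean0 : String := PySem.Str.replace word " " ""
    let clean : String := if PySem.Str.len clean0 > (rem : Int) then PySem.Str.slice clean0 none (some (rem : Int)) else clean0
    clean :: pvG (rem - clean.toList.length) (idx + 1)
termination_by rem
decreasing_by
  have hw1 := pvWordA_clean_len idx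
  have hw2 : 1 ≤ (PySem.Str.replace "слово" " " "").toList.length := by decide
  split <;> split <;>
    first
      | (rename_i hgt
         simp only [PySem.Str.len_eq] at hgt ⊢
         rw [PySem.Str.toList_slice, PySem.Chars.slice_eq_listSlice,
           PySem.List.slice_to _ (by omega), List.length_take]
         omega)
      | omega

theorem pvG_zero (idx : Nat) : pvG 0 idx = [] := by rw [pvG.eq_def]; simp

theorem pvLoopA_eq_pvG : ∀ (rem : Nat) (target_core total : Int) (collected : List String) (idx : Nat),
    target_core - total = (rem : Int) →
    pvLoopA target_core collected total idx = collected ++ pvG rem idx := by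
  intro rem
  induction rem using Nat.strong_induction_on with
  | _ rem ih =>
    intro target_core total collected idx h
    rw [pvLoopA.eq_def, pvG.eq_def]
    by_cases hz : rem = 0
    · subst hz
      rw [dif_neg (by omega : ¬ total < target_core), dif_pos rfl, List.append_nil]
    · rw [dif_pos (by omega : total < target_core), dif_neg hz]
      simp only
      rw [h]
      set w : String := if pvWordsA.length ≠ 0 then PySem.List.pyGetD pvWordsA ((idx % pvWordsA.length : Nat) : Int) "" else "слово" with hwdef
      set c : String := if PySem.Str.len (PySem.Str.replace w " " "") > (rem : Int) then PySem.Str.slice (PySem.Str.replace w " " "") none (some (rem : Int)) else PySem.Str.replace w " " "" with hcdef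
      have hc1 : 1 ≤ c.toList.length := by
        rw [hcdef, hwdef]
        split
        · exact pvClean_len_pos _ (pvWordA_clean_len idx) _ (by omega)
        · exact pvClean_len_pos _ (by decide) _ (by omega)
      have hcle : (c.toList.length : Int) ≤ (rem : Int) := by
        rw [hcdef]
        split
        · rename_i hgt
          rw [PySem.Str.toList_slice, PySem.Chars.slice_eq_listSlice,
            PySem.List.slice_to _ (by omega : (0:Int) ≤ (rem : Int)), List.length_take]
          omega
        · rename_i hgt
          simp only [PySem.Str.len_eq, not_lt] at hgt
          exact_mod_cast hgt
      rw [ih (rem - c.toList.length) (by omega) target_core (total + PySem.Str.len c) (collected ++ [c]) (idx + 1)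
        (by simp only [PySem.Str.len_eq]; omega)]
      simp [List.append_assoc]

theorem pvG_period : ∀ (rem idx : Nat), pvG rem (idx + 8) = pvG rem idx := by
  intro rem
  induction rem using Nat.strong_induction_on with
  | _ rem ih =>
    intro idx
    by_cases hz : rem = 0
    · subst hz
      rw [pvG_zero, pvG_zero]
    · conv_lhs => rw [pvG.eq_def]
      conv_rhs => rw [pvG.eq_def]
      rw [dif_neg hz, dif_neg hz]
      have hmod : (idx + 8) % pvWordsA.length = idx % pvWordsA.length := by
        have hL : pvWordsA.length = 8 := by decide
        rw [hL]
        exact Nat.add_mod_right idx 8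
      simp only [hmod]
      set w : String := if pvWordsA.length ≠ 0 then PySem.List.pyGetD pvWordsA ((idx % pvWordsA.length : Nat) : Int) "" else "слово" with hwdef
      set c : String := if PySem.Str.len (PySem.Str.replace w " " "") > (rem : Int) then PySem.Str.slice (PySem.Str.replace w " " "") none (some (rem : Int)) else PySem.Str.replace w " " "" with hcdef
      have hc1 : 1 ≤ c.toList.length := by
        rw [hcdef, hwdef]
        split
        · exact pvClean_len_pos _ (pvWordA_clean_len idx) _ (by omega)
        · exact pvClean_len_pos _ (by decide) _ (by omega)
      refine congrArg (fun t => c :: t) ?_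
      rw [Nat.add_right_comm idx 8 1]
      exact ih (rem - c.toList.length) (by omega) (idx + 1)

theorem pvG_step (rem idx : Nat) (w : String) (hw : pvWordsA.getD (idx % 8) "" = w)
    (hident : PySem.Str.replace w " " "" = w) (h1 : 1 ≤ w.toList.length)
    (hlen : w.toList.length ≤ rem) :
    pvG rem idx = w :: pvG (rem - w.toList.length) (idx + 1) := by
  rw [pvG.eq_def, dif_neg (by omega : ¬ rem = 0)]
  have hL : pvWordsA.length = 8 := by decide
  simp only [hL, if_pos (by decide : (8:Nat) ≠ 0), PySem.List.pyGetD_natCast, hw, hident]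
  rw [if_neg (by simp only [PySem.Str.len_eq]; omega)]

theorem pvG_cycle (rem : Nat) (h : 59 ≤ rem) : pvG rem 0 = pvWordsA ++ pvG (rem - 59) 8 := by
  have l0 : ("подробности" : String).toList.length = 11 := by decide
  have l1 : ("пример" : String).toList.length = 6 := by decide
  have l2 : ("детали" : String).toList.length = 6 := by decide
  have l3 : ("вывод" : String).toList.length = 5 := by decide
  have l4 : ("анализ" : String).toList.length = 6 := by decide
  have l5 : ("решение" : String).toList.length = 7 := by decide
  have l6 : ("инициатива" : String).toList.length = 10 := by decide
  have l7 : ("практика" : String).toList.length = 8 := by decide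
  rw [pvG_step (rem) 0 "подробности" (by decide) (by decide) (by decide) (by simp only [l0]; omega)]
  simp only [l0]
  rw [pvG_step (rem - 11) 1 "пример" (by decide) (by decide) (by decide) (by simp only [l1]; omega)]
  simp only [l1]
  rw [pvG_step (rem - 11 - 6) 2 "детали" (by decide) (by decide) (by decide) (by simp only [l2]; omega)]
  simp only [l2]
  rw [pvG_step (rem - 11 - 6 - 6) 3 "вывод" (by decide) (by decide) (by decide) (by simp only [l3]; omega)]
  simp only [l3]
  rw [pvG_step (rem - 11 - 6 - 6 - 5) 4 "анализ" (by decide) (by decide) (by decide) (by simp only [l4]; omega)]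
  simp only [l4]
  rw [pvG_step (rem - 11 - 6 - 6 - 5 - 6) 5 "решение" (by decide) (by decide) (by decide) (by simp only [l5]; omega)]
  simp only [l5]
  rw [pvG_step (rem - 11 - 6 - 6 - 5 - 6 - 7) 6 "инициатива" (by decide) (by decide) (by decide) (by simp only [l6]; omega)]
  simp only [l6]
  rw [pvG_step (rem - 11 - 6 - 6 - 5 - 6 - 7 - 10) 7 "практика" (by decide) (by decide) (by decide) (by simp only [l7]; omega)]
  simp only [l7]
  rw [show rem - 11 - 6 - 6 - 5 - 6 - 7 - 10 - 8 = rem - 59 from by omega]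
  rfl

theorem pvG_cycles (q rem : Nat) : pvG (59 * q + rem) 0 = (List.replicate q pvWordsA).flatten ++ pvG rem 0 := by
  induction q with
  | zero => simp
  | succ n ihq =>
    have h1 : 59 * (n + 1) + rem = 59 + (59 * n + rem) := by ring
    rw [h1, pvG_cycle _ (by omega), show 59 + (59 * n + rem) - 59 = 59 * n + rem from by omega,
      show (8:Nat) = 0 + 8 from rfl, pvG_period, ihq, List.replicate_succ, List.flatten_cons,
      List.append_assoc]

theorem pvG_eq_partial : ∀ (ws : List String) (idx r : Nat),
    pvWordsA.drop idx = ws → r ≤ (ws.map (fun w => w.toList.length)).sum →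
    pvG r idx = pvPartialB (r : Int) ws := by
  intro ws
  induction ws with
  | nil =>
    intro idx r _ hsum
    simp only [List.map_nil, List.sum_nil, Nat.le_zero] at hsum
    subst hsum
    rw [pvG_zero]
    rfl
  | cons w rest ihw =>
    intro idx r h hsum
    by_cases hr0 : r = 0
    · subst hr0
      rw [pvG_zero]
      simp [pvPartialB]
    · have hidx : idx < pvWordsA.length := by
        by_contra hge
        rw [List.drop_eq_nil_of_le (by omega)] at h
        exact List.cons_ne_nil w rest h.symm
      have hL : pvWordsA.length = 8 := by decide
      have hget : pvWordsA[idx]? = some w := by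
        have h0 : (pvWordsA.drop idx)[0]? = some w := by rw [h]; rfl
        rw [List.getElem?_drop, Nat.add_zero] at h0
        exact h0
      have hw : pvWordsA.getD (idx % 8) "" = w := by
        rw [Nat.mod_eq_of_lt (by omega), List.getD_eq_getElem?_getD, hget]
        rfl
      have hmem : w ∈ pvWordsA := List.mem_of_getElem? hget
      have hall : ∀ x ∈ pvWordsA, PySem.Str.replace x " " "" = x ∧ 1 ≤ x.toList.length := by decide
      have hident := (hall w hmem).1
      have h1 := (hall w hmem).2
      by_cases hbig : r < w.toList.length
      · -- truncated word, loop ends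
        rw [pvG.eq_def, dif_neg hr0]
        simp only [hL, if_pos (by decide : (8:Nat) ≠ 0), PySem.List.pyGetD_natCast, hw, hident]
        rw [if_pos (by simp only [PySem.Str.len_eq]; omega)]
        have hlenslice : (PySem.Str.slice w none (some (r : Int))).toList.length = r := by
          rw [PySem.Str.toList_slice, PySem.Chars.slice_eq_listSlice,
            PySem.List.slice_to _ (by omega : (0:Int) ≤ (r:Int)), List.length_take]
          omega
        rw [hlenslice, Nat.sub_self, pvG_zero]
        simp only [pvPartialB]
        rw [if_neg (by omega), if_pos (by simp only [PySem.Str.len_eq]; omega)]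
      · rw [pvG_step r idx w hw hident h1 (by omega)]
        simp only [pvPartialB]
        rw [if_neg (by omega), if_neg (by simp only [PySem.Str.len_eq]; omega)]
        refine congrArg (fun t => w :: t) ?_
        have hrest : pvWordsA.drop (idx + 1) = rest := by
          have h2 : List.drop 1 (List.drop idx pvWordsA) = List.drop (idx + 1) pvWordsA :=
            List.drop_drop
          rw [← h2, h]
          rfl
        rw [ihw (idx + 1) (r - w.toList.length) hrest (by simp only [List.map_cons, List.sum_cons] at hsum; omega)]
        rw [show ((r - w.toList.length : Nat) : Int) = (r : Int) - PySem.Str.len w from by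
          simp only [PySem.Str.len_eq]; omega]

set_option maxRecDepth 16384 in
set_option maxHeartbeats 1000000 in
theorem pvG_elems : ∀ (rem idx : Nat) (s : String), s ∈ pvG rem idx →
    s.toList ≠ [] ∧ ∀ c ∈ s.toList, PySem.Chars.isspace c = false := by
  intro rem
  induction rem using Nat.strong_induction_on with
  | _ rem ih =>
    intro idx s hs
    by_cases hz : rem = 0
    · rw [hz, pvG_zero] at hs
      exact absurd hs (List.not_mem_nil)
    · rw [pvG.eq_def, dif_neg hz] at hs
      simp only at hs
      set w : String := if pvWordsA.length ≠ 0 then PySem.List.pyGetD pvWordsA ((idx % pvWordsA.length : Nat) : Int) "" else "слово" with hwdef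
      have hmem : w ∈ pvWordsA := by
        rw [hwdef, if_pos (by decide : pvWordsA.length ≠ 0)]
        exact PySem.List.pyGetD_mem _ _ (by
          constructor
          · have : (0:Int) ≤ ((idx % pvWordsA.length : Nat) : Int) := Int.natCast_nonneg _
            omega
          · have : idx % pvWordsA.length < pvWordsA.length := Nat.mod_lt _ (by decide)
            exact_mod_cast this)
      have hgood : ∀ x ∈ pvWordsA, PySem.Str.replace x " " "" = x ∧ 1 ≤ x.toList.length ∧
          ∀ c ∈ x.toList, PySem.Chars.isspace c = false := by
        intro x hx
        fin_cases hx <;>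
          exact ⟨by decide, by decide, by
            intro c hc
            simpa using List.all_eq_true.mp (by rfl : (String.toList _).all (fun c => !PySem.Chars.isspace c) = true) c hc⟩
      obtain ⟨hident, h1, hns⟩ := hgood w hmem
      rcases List.mem_cons.mp hs with hc | hrec
      · subst hc
        rw [hident]
        split
        · constructor
          · apply List.ne_nil_of_length_pos
            rw [PySem.Str.toList_slice, PySem.Chars.slice_eq_listSlice,
              PySem.List.slice_to _ (by omega : (0:Int) ≤ (rem:Int)), List.length_take]
            omega
          · intro c hcmem
            rw [PySem.Str.toList_slice, PySem.Chars.slice_eq_listSlice,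
              PySem.List.slice_to _ (by omega : (0:Int) ≤ (rem:Int))] at hcmem
            exact hns c (List.mem_of_mem_take hcmem)
        · exact ⟨List.ne_nil_of_length_pos (by omega), hns⟩
      · exact ih _ (by
          have hc1 : 1 ≤ (if PySem.Str.len (PySem.Str.replace w " " "") > (rem : Int) then PySem.Str.slice (PySem.Str.replace w " " "") none (some (rem : Int)) else PySem.Str.replace w " " "").toList.length := by
            rw [hident]
            exact pvClean_len_pos _ h1 _ (by omega)
          omega) _ _ hrec

theorem pvG_ne_nil (rem idx : Nat) (h : rem ≠ 0) : pvG rem idx ≠ [] := by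
  rw [pvG.eq_def, dif_neg h]
  simp

theorem pv_join_head (cs : List Char) (rest : List (List Char)) :
    ∃ u, PySem.Chars.join [' '] (cs :: rest) = cs ++ u := by
  cases rest with
  | nil => exact ⟨[], by rw [PySem.Chars.join_singleton, List.append_nil]⟩
  | cons q r =>
    exact ⟨[' '] ++ PySem.Chars.join [' '] (q :: r), by
      rw [PySem.Chars.join_cons_cons, List.append_assoc]⟩

theorem pv_join_last : ∀ (L : List (List Char)), L ≠ [] → (∀ cs ∈ L, cs ≠ []) →
    ∃ s d cs, cs ∈ L ∧ d ∈ cs ∧ PySem.Chars.join [' '] L = s ++ [d] := by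
  intro L
  induction L with
  | nil => intro h; exact absurd rfl h
  | cons cs rest ihl =>
    intro _ hall
    cases rest with
    | nil =>
      rcases List.eq_nil_or_concat cs with hnil | ⟨s, d, hsd⟩
      · exact absurd hnil (hall cs (by simp))
      · exact ⟨s, d, cs, by simp, by simp [hsd], by rw [PySem.Chars.join_singleton, hsd]; simp⟩
    | cons q r =>
      obtain ⟨s, d, cs', hmem, hd, hjoin⟩ := ihl (by simp) (fun x hx => hall x (List.mem_cons_of_mem _ hx))
      exact ⟨cs ++ [' '] ++ s, d, cs', List.mem_cons_of_mem _ hmem, hd, by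
        rw [PySem.Chars.join_cons_cons, hjoin, List.append_assoc, List.append_assoc]
        simp [List.append_assoc]⟩

theorem pv_strip_join (L : List (List Char)) (hne : L ≠ [])
    (hall : ∀ cs ∈ L, cs ≠ [] ∧ ∀ c ∈ cs, PySem.Chars.isspace c = false) :
    PySem.Chars.strip (PySem.Chars.join [' '] L) = PySem.Chars.join [' '] L ∧
      PySem.Chars.join [' '] L ≠ [] := by
  obtain ⟨cs, rest, rfl⟩ : ∃ cs rest, L = cs :: rest := by
    cases L with
    | nil => exact absurd rfl hne
    | cons a b => exact ⟨a, b, rfl⟩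
  obtain ⟨hcs_ne, hcs_ns⟩ := hall cs (by simp)
  obtain ⟨c, t, rfl⟩ : ∃ c t, cs = c :: t := by
    cases cs with
    | nil => exact absurd rfl hcs_ne
    | cons a b => exact ⟨a, b, rfl⟩
  obtain ⟨u, hju⟩ := pv_join_head (c :: t) rest
  obtain ⟨s, d, cs', _, hd, hjd⟩ := pv_join_last ((c :: t) :: rest) (by simp)
    (fun x hx => (hall x hx).1)
  have hcns : PySem.Chars.isspace c = false := hcs_ns c (by simp)
  have hdns : PySem.Chars.isspace d = false := (hall cs' (by assumption)).2 d hd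
  constructor
  · rw [PySem.Chars.strip]
    have hl : PySem.Chars.lstrip (PySem.Chars.join [' '] ((c :: t) :: rest)) =
        PySem.Chars.join [' '] ((c :: t) :: rest) := by
      rw [PySem.Chars.lstrip, hju]
      simp [hcns]
    rw [hl, PySem.Chars.rstrip, hjd]
    simp [hdns]
  · rw [hju]
    simp

theorem pv_body (C : List String) (hne : C ≠ [])
    (hall : ∀ s ∈ C, s.toList ≠ [] ∧ ∀ c ∈ s.toList, PySem.Chars.isspace c = false) :
    PySem.Str.strip (PySem.Str.join " " (C.filter (fun it => it != ""))) = PySem.Str.join " " C ∧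
      PySem.Str.join " " C ≠ "" := by
  have hfilter : C.filter (fun it => it != "") = C := by
    apply List.filter_eq_self.mpr
    intro s hs
    have h1 := (hall s hs).1
    simp only [bne_iff_ne, ne_eq]
    intro hcon
    exact h1 (by rw [hcon]; rfl)
  have hsp : (" " : String).toList = [' '] := rfl
  have hLne : C.map String.toList ≠ [] := by
    intro hcon
    exact hne (List.map_eq_nil_iff.mp hcon)
  have hLall : ∀ cs ∈ C.map String.toList, cs ≠ [] ∧ ∀ c ∈ cs, PySem.Chars.isspace c = false := by
    intro cs hcs
    obtain ⟨s, hs, rfl⟩ := List.mem_map.mp hcs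
    exact hall s hs
  obtain ⟨hstrip, hjne⟩ := pv_strip_join (C.map String.toList) hLne hLall
  constructor
  · apply String.toList_inj.mp
    rw [PySem.Str.toList_strip, hfilter, PySem.Str.toList_join, hsp, hstrip]
  · intro hcon
    apply hjne
    have := congrArg String.toList hcon
    rw [PySem.Str.toList_join, hsp] at this
    exact this

-- ===== VERDICT (by name: the statement is the Claim_ definition above) =====
theorem build_precision_filler_py_spec : Claim_equal_build_precision_filler_py := by
  intro delta _
  unfold Spec_build_precision_filler_py build_precision_filler_py build_precision_filler_py_alt
  by_cases h0 : delta ≤ 0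
  · rw [if_pos h0, if_pos h0]
  · rw [if_neg h0, if_neg h0]
    simp only
    by_cases h1 : delta - 1 = 0
    · rw [if_pos h1]
      rw [show max 0 (delta - 1) = 0 from by omega]
      rw [pvLoopA.eq_def, dif_neg (by omega : ¬ (0:Int) < 0)]
      rw [show PySem.Str.strip (PySem.Str.join " " (List.filter (fun it => it != "") [])) = "" from by decide]
      rw [if_neg (by simp)]
    · rw [if_neg h1]
      set n := (delta - 1).toNat with hn
      have hne : n ≠ 0 := by omega
      have hA : pvLoopA (max 0 (delta - 1)) [] 0 0 = pvG n 0 := by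
        rw [show max 0 (delta - 1) = ((n : Nat) : Int) from by omega]
        rw [pvLoopA_eq_pvG n ((n : Nat) : Int) 0 [] 0 (by omega)]
        rfl
      have hcyc : pvCycleLenB = 59 := by decide
      have hq : (PySem.Int.floordiv (delta - 1) pvCycleLenB).toNat = n / 59 := by
        rw [hcyc, show delta - 1 = ((n : Nat) : Int) from by omega,
          show (59 : Int) = ((59 : Nat) : Int) from rfl, PySem.Int.floordiv_natCast]
        exact Int.toNat_natCast _
      have hr : PySem.Int.mod (delta - 1) pvCycleLenB = ((n % 59 : Nat) : Int) := by
        rw [hcyc, show delta - 1 = ((n : Nat) : Int) from by omega,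
          show (59 : Int) = ((59 : Nat) : Int) from rfl, PySem.Int.mod_natCast]
      have hB : pvPartialB (PySem.Int.mod (delta - 1) pvCycleLenB) pvWordsB = pvG (n % 59) 0 := by
        rw [hr]
        have hsum : (pvWordsB.map (fun w => w.toList.length)).sum = 59 := by decide
        exact (pvG_eq_partial pvWordsB 0 (n % 59) rfl
          (by rw [hsum]; omega)).symm
      have hflat : (List.replicate (PySem.Int.floordiv (delta - 1) pvCycleLenB).toNat pvWordsB).flatten ++ pvG (n % 59) 0 = pvG n 0 := by
        rw [hq, show pvWordsB = pvWordsA from rfl, ← pvG_cycles (n / 59) (n % 59),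
          Nat.div_add_mod]
      rw [hA]
      obtain ⟨hb1, hb2⟩ := pv_body (pvG n 0) (pvG_ne_nil n 0 hne) (pvG_elems n 0)
      rw [hb1, if_pos hb2, hB, hflat]
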